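-- pv_equiv track=rewrite | github.com/kylealrich/JS-Mapper | BIN/javascript_mapper.py | detect_record_length
-- ===== SOURCE A (Python) =====
-- def detect_record_length(raw_text, valid_indicators):
--     """Auto-detect fixed record length for concatenated records (no newlines)."""
--     total = len(raw_text)
--     for rl in range(100, 10001):
--         if total % rl != 0:
--             continue
--         all_valid = True
--         for p in range(0, total, rl):
--             if raw_text[p] not in valid_indicators:
--                 all_valid = False
--                 break
--         if all_valid and total // rl > 1:
--             return rl
--     return 0
-- ===== SOURCE B (Python) =====
-- def detect_record_length(raw_text, valid_indicators):
--     """Auto-detect fixed record length for concatenated records (no newlines)."""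
--     total = len(raw_text)
--     if total == 0:
--         return 0
--     # enumerate divisors of total by trial division up to sqrt(total)
--     divisors = []
--     d = 1
--     while d * d <= total:
--         if total % d == 0:
--             divisors.append(d)
--             if d != total // d:
--                 divisors.append(total // d)
--         d += 1
--     for rl in sorted(x for x in divisors if 100 <= x <= 10000):
--         if total // rl > 1 and all(raw_text[p] in valid_indicators for p in range(0, total, rl)):
--             return rl
--     return 0
-- ===== Notes on version B (the rewrite author's own statement) =====
-- stated objective: alternative
-- what changed: Instead of testing all 9901 candidate lengths 100..10000 for divisibility, B enumerates the divisors of len(raw_text) by trial division up to its square root, keeps those in 100..10000 sorted ascending, and checks record starts only for those actual divisors.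
import Mathlib
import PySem

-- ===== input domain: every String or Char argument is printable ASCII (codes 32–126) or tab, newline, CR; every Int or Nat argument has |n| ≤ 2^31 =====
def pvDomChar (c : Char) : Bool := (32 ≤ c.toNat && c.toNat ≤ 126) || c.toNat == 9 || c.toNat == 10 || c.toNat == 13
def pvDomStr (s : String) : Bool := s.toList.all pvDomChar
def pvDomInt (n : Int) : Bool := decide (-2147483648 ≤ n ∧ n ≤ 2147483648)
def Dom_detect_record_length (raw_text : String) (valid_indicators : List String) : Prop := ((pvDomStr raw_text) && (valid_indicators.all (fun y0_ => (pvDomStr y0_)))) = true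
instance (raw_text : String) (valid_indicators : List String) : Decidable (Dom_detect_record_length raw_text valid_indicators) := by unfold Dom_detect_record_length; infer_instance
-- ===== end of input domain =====

-- B replaces A's scan of all 9901 candidate lengths by a trial-division enumeration of the
-- actual divisors of len(raw_text), sorted ascending and filtered to 100..10000 (objective: alternative).

-- ===== PORT A =====
-- inner 'for p in range(0, total, rl)' with break
def pvA_allValid (raw_text : String) (valid_indicators : List String) : List Int → Bool
  | [] => true
  | p :: rest =>
    match PySem.Str.pyGet? raw_text p with
    | some c =>
      if !(valid_indicators.contains (String.ofList [c])) then false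
      else pvA_allValid raw_text valid_indicators rest
    | none => false  -- unreachable: every p generated by range(0, total, rl) is in range

-- outer 'for rl in range(100, 10001)' with early return
def pvA_loop (raw_text : String) (valid_indicators : List String) (total : Int) : List Int → Int
  | [] => 0
  | rl :: rest =>
    if PySem.Int.mod total rl ≠ 0 then pvA_loop raw_text valid_indicators total rest
    else if pvA_allValid raw_text valid_indicators (PySem.List.pyRange 0 total rl)
            && decide (1 < PySem.Int.floordiv total rl) then rl
    else pvA_loop raw_text valid_indicators total rest

def detect_record_length (raw_text : String) (valid_indicators : List String) : Int :=
  pvA_loop raw_text valid_indicators (PySem.Str.len raw_text) (PySem.List.pyRange 100 10001 1)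

-- ===== PORT B =====
def pvB_startValid (raw_text : String) (valid_indicators : List String) (p : Int) : Bool :=
  match PySem.Str.pyGet? raw_text p with
  | some c => valid_indicators.contains (String.ofList [c])
  | none => false  -- unreachable: every p generated by range(0, total, rl) is in range

-- 'while d * d <= total: …' collecting d and total // d
def pvB_divLoop (total d : Int) (acc : List Int) : List Int :=
  if d * d ≤ total then
    pvB_divLoop total (d + 1)
      (if PySem.Int.mod total d = 0 then
        acc ++ [d] ++
          (if d ≠ PySem.Int.floordiv total d then [PySem.Int.floordiv total d] else [])
       else acc)
  else acc
termination_by (total + 1 - d).toNat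
decreasing_by
  have hle : d ≤ total := by
    rcases le_or_gt d 0 with h0 | h0
    · nlinarith
    · nlinarith
  omega

-- 'for rl in sorted(…): …' with early return
def pvB_find (raw_text : String) (valid_indicators : List String) (total : Int) : List Int → Int
  | [] => 0
  | rl :: rest =>
    if decide (1 < PySem.Int.floordiv total rl)
        && (PySem.List.pyRange 0 total rl).all (pvB_startValid raw_text valid_indicators)
    then rl
    else pvB_find raw_text valid_indicators total rest

def detect_record_length_alt (raw_text : String) (valid_indicators : List String) : Int :=
  let total := PySem.Str.len raw_text
  if total = 0 then 0
  else
    pvB_find raw_text valid_indicators total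
      (PySem.List.sorted
        ((pvB_divLoop total 1 []).filter (fun x => decide (100 ≤ x) && decide (x ≤ 10000)))
        (fun x => x) false)

-- ===== PRECONDITION & SPEC =====
def Spec_detect_record_length (raw_text : String) (valid_indicators : List String) (out : Int) : Prop := out = detect_record_length_alt raw_text valid_indicators
instance (raw_text : String) (valid_indicators : List String) (out : Int) : Decidable (Spec_detect_record_length raw_text valid_indicators out) := by unfold Spec_detect_record_length; infer_instance

-- ===== CLAIM (what is proved, stated in full; the proofs are below) =====
def Claim_equal_detect_record_length : Prop := ∀ (raw_text : String) (valid_indicators : List String), Dom_detect_record_length raw_text valid_indicators → Spec_detect_record_length raw_text valid_indicators (detect_record_length raw_text valid_indicators)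

-- ===== LEMMAS AND PROOFS =====

-- the semantic per-candidate test shared by both programs
def pvGood (raw_text : String) (valid_indicators : List String) (total rl : Int) : Bool :=
  decide (1 < PySem.Int.floordiv total rl)
    && (PySem.List.pyRange 0 total rl).all (pvB_startValid raw_text valid_indicators)

theorem pvA_allValid_eq_all (raw_text : String) (valid_indicators : List String) (ps : List Int) :
    pvA_allValid raw_text valid_indicators ps = ps.all (pvB_startValid raw_text valid_indicators) := by
  induction ps with
  | nil => rfl
  | cons p rest ih =>
    simp only [pvA_allValid, List.all_cons, pvB_startValid]
    cases h : PySem.Str.pyGet? raw_text p with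
    | none => simp
    | some c =>
      by_cases hc : valid_indicators.contains (String.ofList [c]) <;> simp [hc, ih]

theorem pvA_loop_eq_find (raw_text : String) (valid_indicators : List String) (total : Int) (l : List Int) :
    pvA_loop raw_text valid_indicators total l
      = (l.find? (fun rl => decide (PySem.Int.mod total rl = 0)
            && pvGood raw_text valid_indicators total rl)).getD 0 := by
  induction l with
  | nil => rfl
  | cons rl rest ih =>
    have hA : (pvA_allValid raw_text valid_indicators (PySem.List.pyRange 0 total rl)
        && decide (1 < PySem.Int.floordiv total rl)) = pvGood raw_text valid_indicators total rl := by
      rw [pvA_allValid_eq_all, Bool.and_comm]; rfl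
    rw [pvA_loop, hA, List.find?_cons]
    by_cases hm : PySem.Int.mod total rl = 0
    · rw [if_neg (by simp [hm])]
      simp only [hm, decide_true, Bool.true_and]
      cases hg : pvGood raw_text valid_indicators total rl
      · rw [if_neg (by simp [hg]), ih]
      · rw [if_pos (by simp [hg])]; rfl
    · rw [if_pos hm, ih]
      simp [hm]

theorem pvB_find_eq_find (raw_text : String) (valid_indicators : List String) (total : Int) (l : List Int) :
    pvB_find raw_text valid_indicators total l
      = (l.find? (pvGood raw_text valid_indicators total)).getD 0 := by
  induction l with
  | nil => rfl
  | cons rl rest ih =>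
    have hB : (decide (1 < PySem.Int.floordiv total rl)
        && (PySem.List.pyRange 0 total rl).all (pvB_startValid raw_text valid_indicators))
        = pvGood raw_text valid_indicators total rl := rfl
    rw [pvB_find, hB, List.find?_cons]
    cases hg : pvGood raw_text valid_indicators total rl
    · rw [if_neg (by simp [hg]), ih]
    · rw [if_pos (by simp [hg])]; rfl

-- find? over 'q && r' is find? over r on the q-filtered list
theorem find?_and_eq_find?_filter (q r : Int → Bool) (l : List Int) :
    l.find? (fun x => q x && r x) = (l.filter q).find? r := by
  induction l with
  | nil => rfl
  | cons x t ih =>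
    rw [List.filter_cons, List.find?_cons]
    cases hq : q x
    · rw [if_neg (by simp [hq])]
      simp only [hq, Bool.false_and]
      exact ih
    · rw [if_pos (by simp [hq]), List.find?_cons]
      cases hr : r x
      · simp only [hq, hr, Bool.and_false]
        exact ih
      · simp only [hq, hr, Bool.and_true]

-- find? on a ≤-sorted list is determined by the set of members
theorem find?_eq_of_sorted_of_mem_iff (p : Int → Bool) (l₁ l₂ : List Int)
    (h₁ : l₁.Pairwise (· ≤ ·)) (h₂ : l₂.Pairwise (· ≤ ·))
    (hm : ∀ x, x ∈ l₁ ↔ x ∈ l₂) : l₁.find? p = l₂.find? p := by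
  have key : ∀ (l : List Int), l.Pairwise (· ≤ ·) → ∀ a, l.find? p = some a →
      p a = true ∧ a ∈ l ∧ ∀ b ∈ l, p b = true → a ≤ b := by
    intro l hl
    induction l with
    | nil => intro a h; simp at h
    | cons x t ih =>
      intro a h
      rw [List.pairwise_cons] at hl
      by_cases hx : p x = true
      · rw [List.find?_cons_of_pos hx] at h
        obtain rfl : x = a := by injection h
        refine ⟨hx, List.mem_cons_self, ?_⟩
        intro b hb _
        rcases List.mem_cons.1 hb with rfl | hb
        · exact le_refl _
        · exact hl.1 b hb
      · simp only [Bool.not_eq_true] at hx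
        rw [List.find?_cons_of_neg (by simp [hx])] at h
        obtain ⟨hpa, hmem, hmin⟩ := ih hl.2 a h
        refine ⟨hpa, List.mem_cons_of_mem _ hmem, ?_⟩
        intro b hb hpb
        rcases List.mem_cons.1 hb with rfl | hb
        · rw [hx] at hpb; exact absurd hpb (by simp)
        · exact hmin b hb hpb
  cases h1 : l₁.find? p with
  | none =>
    rw [List.find?_eq_none] at h1
    cases h2 : l₂.find? p with
    | none => rfl
    | some a =>
      obtain ⟨hpa, hmem, _⟩ := key l₂ h₂ a h2
      exact absurd hpa (by simpa using h1 a ((hm a).2 hmem))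
  | some a =>
    obtain ⟨hpa, hmem, hmin⟩ := key l₁ h₁ a h1
    cases h2 : l₂.find? p with
    | none =>
      rw [List.find?_eq_none] at h2
      exact absurd hpa (by simpa using h2 a ((hm a).1 hmem))
    | some b =>
      obtain ⟨hpb, hmemb, hminb⟩ := key l₂ h₂ b h2
      have hab : a ≤ b := hmin b ((hm b).2 hmemb) hpb
      have hba : b ≤ a := hminb a ((hm a).1 hmem) hpa
      exact congrArg some (le_antisymm hab hba)

-- membership in the trial-division accumulator
theorem pvB_divLoop_mem (total : Int) (d : Int) (acc : List Int) (x : Int) (hd : 1 ≤ d) :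
    x ∈ pvB_divLoop total d acc
      ↔ x ∈ acc ∨ ∃ e, d ≤ e ∧ e * e ≤ total ∧ PySem.Int.mod total e = 0
          ∧ (x = e ∨ x = PySem.Int.floordiv total e) := by
  rw [pvB_divLoop]
  by_cases h : d * d ≤ total
  · rw [if_pos h]
    rw [pvB_divLoop_mem total (d + 1) _ x (by omega)]
    have hsplit : ∀ P : Int → Prop, (∃ e, d ≤ e ∧ P e) ↔ P d ∨ ∃ e, d + 1 ≤ e ∧ P e := by
      intro P
      constructor
      · rintro ⟨e, he, hp⟩
        rcases eq_or_lt_of_le he with rfl | hlt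
        · exact Or.inl hp
        · exact Or.inr ⟨e, by omega, hp⟩
      · rintro (hp | ⟨e, he, hp⟩)
        · exact ⟨d, le_refl _, hp⟩
        · exact ⟨e, by omega, hp⟩
    rw [hsplit (fun e => e * e ≤ total ∧ PySem.Int.mod total e = 0
          ∧ (x = e ∨ x = PySem.Int.floordiv total e))]
    by_cases hm : PySem.Int.mod total d = 0
    · rw [if_pos hm]
      by_cases hq : d ≠ PySem.Int.floordiv total d
      · rw [if_pos hq]
        simp only [List.mem_append, List.mem_singleton]
        constructor
        · rintro (((hacc | hxd) | hxf) | hrest)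
          · exact Or.inl hacc
          · exact Or.inr (Or.inl ⟨h, hm, Or.inl hxd⟩)
          · exact Or.inr (Or.inl ⟨h, hm, Or.inr hxf⟩)
          · exact Or.inr (Or.inr hrest)
        · rintro (hacc | ⟨_, _, (hxd | hxf)⟩ | hrest)
          · exact Or.inl (Or.inl (Or.inl hacc))
          · exact Or.inl (Or.inl (Or.inr hxd))
          · exact Or.inl (Or.inr hxf)
          · exact Or.inr hrest
      · rw [if_neg hq]
        push_neg at hq
        simp only [List.mem_append, List.not_mem_nil, or_false, List.mem_singleton,
          List.append_nil]
        constructor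
        · rintro ((hacc | hxd) | hrest)
          · exact Or.inl hacc
          · exact Or.inr (Or.inl ⟨h, hm, Or.inl hxd⟩)
          · exact Or.inr (Or.inr hrest)
        · rintro (hacc | ⟨_, _, (hxd | hxd)⟩ | hrest)
          · exact Or.inl (Or.inl hacc)
          · exact Or.inl (Or.inr hxd)
          · exact Or.inl (Or.inr (hxd.trans hq.symm))
          · exact Or.inr hrest
    · rw [if_neg hm]
      constructor
      · rintro (hacc | hrest)
        · exact Or.inl hacc
        · exact Or.inr (Or.inr hrest)
      · rintro (hacc | ⟨_, hmd, _⟩ | hrest)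
        · exact Or.inl hacc
        · exact absurd hmd hm
        · exact Or.inr hrest
  · rw [if_neg h]
    constructor
    · intro hacc; exact Or.inl hacc
    · rintro (hacc | ⟨e, hde, hee, _, _⟩)
      · exact hacc
      · exfalso
        have : d * d ≤ e * e := by nlinarith
        omega
termination_by (total + 1 - d).toNat
decreasing_by
  have hle : d ≤ total := by
    rcases le_or_gt d 0 with h0 | h0
    · nlinarith
    · nlinarith
  omega

-- for positive total, the accumulator holds exactly the positive divisors
theorem pvB_divisors_mem (total : Int) (ht : 1 ≤ total) (x : Int) :
    x ∈ pvB_divLoop total 1 [] ↔ 1 ≤ x ∧ x ∣ total := by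
  rw [pvB_divLoop_mem total 1 [] x (le_refl 1)]
  simp only [List.not_mem_nil, false_or]
  constructor
  · rintro ⟨e, he1, hee, hmod, hx⟩
    have hedvd : e ∣ total := (PySem.Int.mod_eq_zero_iff_dvd total e).1 hmod
    obtain ⟨k, hk⟩ := hedvd
    have hkpos : 1 ≤ k := by nlinarith
    have hfd : PySem.Int.floordiv total e = k := by
      rw [PySem.Int.floordiv_eq_ediv_of_pos (by omega)]
      rw [hk, Int.mul_ediv_cancel_left _ (by omega)]
    rcases hx with rfl | rfl
    · exact ⟨he1, ⟨k, hk⟩⟩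
    · rw [hfd]
      exact ⟨hkpos, ⟨e, by rw [hk, mul_comm]⟩⟩
  · rintro ⟨hx1, hxdvd⟩
    obtain ⟨k, hk⟩ := hxdvd
    have hkpos : 1 ≤ k := by nlinarith
    by_cases hxx : x * x ≤ total
    · exact ⟨x, hx1, hxx, (PySem.Int.mod_eq_zero_iff_dvd total x).2 ⟨k, hk⟩, Or.inl rfl⟩
    · refine ⟨k, hkpos, ?_, (PySem.Int.mod_eq_zero_iff_dvd total k).2 ⟨x, by rw [hk, mul_comm]⟩, Or.inr ?_⟩
      · nlinarith
      · rw [PySem.Int.floordiv_eq_ediv_of_pos (by omega), hk, Int.mul_ediv_cancel _ (by omega)]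

-- ===== VERDICT (by name: the statement is the Claim_ definition above) =====
set_option maxRecDepth 8192 in
theorem detect_record_length_spec : Claim_equal_detect_record_length := by
  intro raw_text valid_indicators _
  unfold Spec_detect_record_length detect_record_length detect_record_length_alt
  set total := PySem.Str.len raw_text with htot
  have htot0 : 0 ≤ total := by
    rw [htot, PySem.Str.len_eq]; exact Int.natCast_nonneg _
  rw [pvA_loop_eq_find]
  rw [find?_and_eq_find?_filter]
  by_cases hz : total = 0
  · rw [if_pos hz]
    have : ∀ rl ∈ (PySem.List.pyRange 100 10001 1).filter
        (fun rl => decide (PySem.Int.mod total rl = 0)),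
        ¬ pvGood raw_text valid_indicators total rl = true := by
      intro rl hrl
      have hmem := List.mem_filter.1 hrl
      have h100 : 100 ≤ rl := ((PySem.List.mem_pyRange_one).1 hmem.1).1
      simp only [pvGood, Bool.and_eq_true, decide_eq_true_eq]
      rintro ⟨hgt, -⟩
      rw [hz, PySem.Int.floordiv_eq_ediv_of_pos (by omega)] at hgt
      simp at hgt
    rw [List.find?_eq_none.2 this]
    rfl
  · rw [if_neg hz]
    have ht1 : 1 ≤ total := by omega
    rw [pvB_find_eq_find]
    refine congrArg (fun o : Option Int => o.getD 0)
      (find?_eq_of_sorted_of_mem_iff _ _ _ ?_ ?_ ?_)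
    · exact (PySem.List.pairwise_lt_pyRange_one 100 10001).filter _ |>.imp le_of_lt
    · exact PySem.List.sorted_pairwise _ _
    · intro x
      rw [PySem.List.mem_sorted, List.mem_filter, List.mem_filter,
        PySem.List.mem_pyRange_one, pvB_divisors_mem total ht1 x]
      simp only [Bool.and_eq_true, decide_eq_true_eq]
      constructor
      · rintro ⟨⟨h100, h10001⟩, hmod⟩
        have hdvd : x ∣ total := (PySem.Int.mod_eq_zero_iff_dvd total x).1 (by simpa using hmod)
        exact ⟨⟨by omega, hdvd⟩, by omega, by omega⟩
      · rintro ⟨⟨hx1, hdvd⟩, h100, h10000⟩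
        exact ⟨⟨by omega, by omega⟩, by simp [(PySem.Int.mod_eq_zero_iff_dvd total x).2 hdvd]⟩
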